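-- pv_equiv track=rewrite | github.com/randalkoene/formalizer | tools/system/daywiz/daywiz-autodata.py | extract_email_details
-- ===== SOURCE A (Python) =====
-- def get_email_data(email_data_str:str)->dict:
--     fromstart = email_data_str.find('From: ')
--     if fromstart<0:
--         return None
--     fromstart += len('From: ')
--     fromend = email_data_str.find('\n', fromstart)
--     if fromend<0:
--         return None
--     details = {}
--     details['from'] = email_data_str[fromstart:fromend]
--     subjectstart = email_data_str.find('Subj: ', fromend)
--     if subjectstart<0:
--         return None
--     subjectstart += len('Subj: ')
--     subjectend = email_data_str.find('\n', subjectstart)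
--     if subjectend<0:
--         return None
--     details['subject'] = email_data_str[subjectstart:subjectend]
--     return details
--
-- def extract_email_details(data_str)->list:
--     if isinstance(data_str, bytes):
--         data_str = data_str.decode()
--     # Are email details included?
--     emailspos = data_str.find('Emails from')
--     if emailspos < 0:
--         return None
--     # Identify separated emails and collect details into list
--     startpos = data_str.find('\n', emailspos)
--     if startpos < 0:
--         return None
--     startpos += 1
--     email_details = []
--     while True:
--         nextpos = data_str.find('-----', startpos)
--         if nextpos < 0:
--             break;
--         email_data = get_email_data(data_str[startpos:nextpos])
--         if email_data:
--             email_details.append(email_data)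
--         startpos = data_str.find('\n', nextpos)
--         if startpos < 0:
--             break;
--         startpos += 1
--     return email_details
-- ===== SOURCE B (Python) =====
-- def _parse_lines(lines):
--     for i, line in enumerate(lines):
--         p = line.find('From: ')
--         if p < 0:
--             continue
--         for later in lines[i + 1:]:
--             q = later.find('Subj: ')
--             if q >= 0:
--                 return {'from': line[p + 6:], 'subject': later[q + 6:]}
--         return None
--     return None
--
-- def extract_email_details(data_str) -> list:
--     if isinstance(data_str, bytes):
--         data_str = data_str.decode()
--     pos = data_str.find('Emails from')
--     if pos < 0:
--         return None
--     nl = data_str.find('\n', pos)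
--     if nl < 0:
--         return None
--     emails = []
--     buf = []
--     for line in data_str[nl + 1:].split('\n'):
--         if '-----' in line:
--             d = _parse_lines(buf)
--             if d:
--                 emails.append(d)
--             buf = []
--         else:
--             buf.append(line)
--     return emails
-- ===== Notes on version B (the rewrite author's own statement) =====
-- stated objective: simpler
-- what changed: A scans the whole text with index-based str.find/slicing in a while-loop; B splits the text after the header line on ' ' once and walks the lines with a buffer of complete lines per segment, parsing each closed segment line by line (first buffered line containing 'From: ', then the first later one containing 'Subj: ').
import Mathlib
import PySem

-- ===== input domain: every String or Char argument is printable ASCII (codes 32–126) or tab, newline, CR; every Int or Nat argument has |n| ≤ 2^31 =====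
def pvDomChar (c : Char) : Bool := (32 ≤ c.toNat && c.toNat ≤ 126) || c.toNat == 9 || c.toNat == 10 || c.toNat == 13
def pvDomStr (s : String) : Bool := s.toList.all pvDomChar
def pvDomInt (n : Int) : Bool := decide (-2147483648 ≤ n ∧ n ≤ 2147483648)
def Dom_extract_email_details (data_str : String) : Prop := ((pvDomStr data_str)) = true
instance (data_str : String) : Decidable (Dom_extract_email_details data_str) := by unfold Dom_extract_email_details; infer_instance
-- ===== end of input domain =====

-- B replaces A's index-based find/slice scanning by a line-based traversal (split on '\n' once,
-- walk the complete lines with a segment buffer); objective: simpler decomposition, same value everywhere.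

-- ===== PORT A =====
def get_email_data (email_data_str : String) : Option (List (String × String)) :=
  let fromstart := PySem.Str.find email_data_str "From: "
  if fromstart < 0 then none
  else
    let fromstart := fromstart + 6
    let fromend := PySem.Str.findFrom email_data_str "\n" fromstart
    if fromend < 0 then none
    else
      let frm := PySem.Str.slice email_data_str (some fromstart) (some fromend)
      let subjectstart := PySem.Str.findFrom email_data_str "Subj: " fromend
      if subjectstart < 0 then none
      else
        let subjectstart := subjectstart + 6
        let subjectend := PySem.Str.findFrom email_data_str "\n" subjectstart
        if subjectend < 0 then none
        else some [("from", frm), ("subject", PySem.Str.slice email_data_str (some subjectstart) (some subjectend))]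

-- the 'while True' loop of A; fuel (startpos strictly increases and stays ≤ len, so len+1 suffices)
def extract_loop (data_str : String) : Nat → Int → List (List (String × String)) → List (List (String × String))
  | 0, _, email_details => email_details
  | fuel + 1, startpos, email_details =>
    let nextpos := PySem.Str.findFrom data_str "-----" startpos
    if nextpos < 0 then email_details
    else
      let email_data := get_email_data (PySem.Str.slice data_str (some startpos) (some nextpos))
      let email_details' := match email_data with
        | some d => email_details ++ [d]
        | none => email_details
      let startpos' := PySem.Str.findFrom data_str "\n" nextpos
      if startpos' < 0 then email_details'
      else extract_loop data_str fuel (startpos' + 1) email_details'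

def extract_email_details (data_str : String) : Option (List (List (String × String))) :=
  let emailspos := PySem.Str.find data_str "Emails from"
  if emailspos < 0 then none
  else
    let startpos := PySem.Str.findFrom data_str "\n" emailspos
    if startpos < 0 then none
    else some (extract_loop data_str (data_str.toList.length + 1) (startpos + 1) [])

-- ===== PORT B =====
-- scan the lines strictly after the 'From: ' line for the first one carrying 'Subj: '
def alt_find_subj (frm : String) : List String → Option (List (String × String))
  | [] => none
  | later :: rest =>
    let q := PySem.Str.find later "Subj: "
    if q < 0 then alt_find_subj frm rest
    else some [("from", frm), ("subject", PySem.Str.slice later (some (q + 6)) none)]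

-- parse one segment: the first line carrying 'From: ', then the first later line carrying 'Subj: '
def alt_parse_lines : List String → Option (List (String × String))
  | [] => none
  | line :: rest =>
    let p := PySem.Str.find line "From: "
    if p < 0 then alt_parse_lines rest
    else alt_find_subj (PySem.Str.slice line (some (p + 6)) none) rest

-- walk the lines, buffering the current block; a '-----' line closes a segment
def alt_walk : List String → List String → List (List (String × String))
  | [], _buf => []
  | line :: rest, buf =>
    if PySem.Str.isIn "-----" line then
      match alt_parse_lines buf with
      | some d => d :: alt_walk rest []
      | none => alt_walk rest []
    else alt_walk rest (buf ++ [line])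

def extract_email_details_alt (data_str : String) : Option (List (List (String × String))) :=
  let pos := PySem.Str.find data_str "Emails from"
  if pos < 0 then none
  else
    let nl := PySem.Str.findFrom data_str "\n" pos
    if nl < 0 then none
    else
      let lines := (PySem.Str.split? (PySem.Str.slice data_str (some (nl + 1)) none) "\n").getD []
      some (alt_walk lines [])

-- ===== PRECONDITION & SPEC =====
def Spec_extract_email_details (data_str : String) (out : Option (List (List (String × String)))) : Prop := out = extract_email_details_alt data_str
instance (data_str : String) (out : Option (List (List (String × String)))) : Decidable (Spec_extract_email_details data_str out) := by unfold Spec_extract_email_details; infer_instance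

-- ===== CLAIM (what is proved, stated in full; the proofs are below) =====
def Claim_equal_extract_email_details : Prop := ∀ (data_str : String), Dom_extract_email_details data_str → Spec_extract_email_details data_str (extract_email_details data_str)

-- ===== LEMMAS AND PROOFS =====

-- proof-side index-free mirror of A's scanning, and line/segment algebra

-- 'Subj: ' part of get_email_data, on the suffix starting at fromend
def subjSpec (t : List Char) : Option (List Char) :=
  if PySem.Chars.find t ['S','u','b','j',':',' '] < 0 then none
  else if PySem.Chars.find (t.drop ((PySem.Chars.find t ['S','u','b','j',':',' ']).toNat + 6)) ['\n'] < 0 then none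
  else some ((t.drop ((PySem.Chars.find t ['S','u','b','j',':',' ']).toNat + 6)).take
      (PySem.Chars.find (t.drop ((PySem.Chars.find t ['S','u','b','j',':',' ']).toNat + 6)) ['\n']).toNat)

-- index-free get_email_data
def getASpec (t : List Char) : Option (List (String × String)) :=
  if PySem.Chars.find t ['F','r','o','m',':',' '] < 0 then none
  else if PySem.Chars.find (t.drop ((PySem.Chars.find t ['F','r','o','m',':',' ']).toNat + 6)) ['\n'] < 0 then none
  else
    match subjSpec (t.drop ((PySem.Chars.find t ['F','r','o','m',':',' ']).toNat + 6 +
        (PySem.Chars.find (t.drop ((PySem.Chars.find t ['F','r','o','m',':',' ']).toNat + 6)) ['\n']).toNat)) with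
    | none => none
    | some sbj => some [("from", String.ofList ((t.drop ((PySem.Chars.find t ['F','r','o','m',':',' ']).toNat + 6)).take
                          (PySem.Chars.find (t.drop ((PySem.Chars.find t ['F','r','o','m',':',' ']).toNat + 6)) ['\n']).toNat)),
                        ("subject", String.ofList sbj)]

-- index-free form of A's while-loop on the suffix after the header line
def specA (t : List Char) : List (List (String × String)) :=
  if PySem.Chars.find t ['-','-','-','-','-'] < 0 then []
  else
    (match getASpec (t.take (PySem.Chars.find t ['-','-','-','-','-']).toNat) with
     | some e => [e]
     | none => []) ++
    (if PySem.Chars.find (t.drop (PySem.Chars.find t ['-','-','-','-','-']).toNat) ['\n'] < 0 then []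
     else specA (t.drop ((PySem.Chars.find t ['-','-','-','-','-']).toNat +
        (PySem.Chars.find (t.drop (PySem.Chars.find t ['-','-','-','-','-']).toNat) ['\n']).toNat + 1)))
  termination_by t.length
  decreasing_by
    have h5 : (['-','-','-','-','-'] : List Char) <:+: t := by
      rw [← PySem.Chars.find_nonneg_iff]; omega
    have := h5.length_le
    simp at this ⊢
    omega

-- terminated-lines flatten and loose join
def Jt (L : List (List Char)) : List Char := (L.map (· ++ ['\n'])).flatten

def LJ : List (List Char) → List Char
  | [] => []
  | [b] => b
  | b :: r@(_ :: _) => b ++ '\n' :: LJ r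

-- structural split at '\n' (head piece, later pieces)
def csplit : List Char → List Char × List (List Char)
  | [] => ([], [])
  | a :: t =>
    let pr := csplit t
    if a = '\n' then ([], pr.1 :: pr.2) else (a :: pr.1, pr.2)

-- ---- find/split lemmas ----
lemma find_cases (s sub : List Char) : PySem.Chars.find s sub = -1 ∨ 0 ≤ PySem.Chars.find s sub := by
  by_cases h : sub <:+: s
  · exact Or.inr ((PySem.Chars.find_nonneg_iff s sub).2 h)
  · exact Or.inl ((PySem.Chars.find_eq_neg_one_iff s sub).2 h)

lemma find_go_shift (sub : List Char) (l : List Char) : ∀ (k : Nat),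
    PySem.Chars.find.go sub l k =
      if PySem.Chars.find.go sub l 0 = -1 then -1 else PySem.Chars.find.go sub l 0 + k := by
  induction l with
  | nil => intro k; simp [PySem.Chars.find.go.eq_1]; split <;> simp_all
  | cons c t ih =>
    intro k
    rw [PySem.Chars.find.go.eq_2, PySem.Chars.find.go.eq_2]
    by_cases hp : sub.isPrefixOf (c :: t) = true
    · simp [hp]
    · simp only [hp, if_false]
      have hc : PySem.Chars.find.go sub t 0 = -1 ∨ 0 ≤ PySem.Chars.find.go sub t 0 := find_cases t sub
      rw [ih (k+1), ih 1]
      rcases hc with h | h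
      · simp [h]
      · split <;> split <;> omega

lemma find_cons (sub : List Char) (c : Char) (t : List Char) :
    PySem.Chars.find (c :: t) sub =
      if sub.isPrefixOf (c :: t) then 0
      else if PySem.Chars.find t sub = -1 then -1 else PySem.Chars.find t sub + 1 := by
  show PySem.Chars.find.go sub (c :: t) 0 = _
  rw [PySem.Chars.find.go.eq_2]
  by_cases hp : sub.isPrefixOf (c :: t) = true
  · simp [hp]
  · simp only [hp, if_false]
    rw [find_go_shift]
    rfl

lemma find_nil' (sub : List Char) (h : sub ≠ []) : PySem.Chars.find [] sub = -1 := by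
  show PySem.Chars.find.go sub [] 0 = -1
  rw [PySem.Chars.find.go.eq_1]
  simp [List.isEmpty_iff, h]

lemma prefix_newline_split {sub w v : List Char} (hne : sub ≠ []) (hnl : '\n' ∉ sub)
    (h : sub <+: (w ++ '\n' :: v)) : sub <+: w := by
  by_cases hlen : sub.length ≤ w.length
  · rw [List.prefix_iff_eq_take] at h ⊢
    rwa [List.take_append_of_le_length hlen] at h
  · exfalso
    apply hnl
    have hi : w.length < sub.length := by omega
    have := List.IsPrefix.getElem h hi
    rw [List.getElem_append_right (by omega)] at this
    simp at this
    rw [← this]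
    exact List.getElem_mem hi

lemma find_append_newline (sub : List Char) (hne : sub ≠ []) (hnl : '\n' ∉ sub) (w v : List Char) :
    PySem.Chars.find (w ++ '\n' :: v) sub =
      if PySem.Chars.find w sub = -1 then
        (if PySem.Chars.find v sub = -1 then -1 else (w.length : Int) + 1 + PySem.Chars.find v sub)
      else PySem.Chars.find w sub := by
  induction w with
  | nil =>
    have hp : ¬ sub.isPrefixOf ('\n' :: v) = true := by
      rw [List.isPrefixOf_iff_prefix]
      intro hpre
      exact absurd (prefix_newline_split hne hnl (w := []) (by simpa using hpre)) (by simp [hne])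
    simp only [List.nil_append, find_cons, hp, if_false, find_nil' sub hne, if_true]
    rcases find_cases v sub with h | h <;> simp [h] <;> omega
  | cons c w' ih =>
    by_cases hp : sub.isPrefixOf (c :: (w' ++ '\n' :: v)) = true
    · have hp2 : sub.isPrefixOf (c :: w') = true := by
        rw [List.isPrefixOf_iff_prefix] at hp ⊢
        exact prefix_newline_split hne hnl (w := c :: w') hp
      rw [show (c :: w') ++ '\n' :: v = c :: (w' ++ '\n' :: v) by simp]
      rw [find_cons, find_cons sub c w']
      simp [hp, hp2]
    · have hp2 : ¬ sub.isPrefixOf (c :: w') = true := by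
        rw [List.isPrefixOf_iff_prefix] at hp ⊢
        intro hpre
        exact hp (hpre.trans (by simp))
      rw [show (c :: w') ++ '\n' :: v = c :: (w' ++ '\n' :: v) by simp]
      rw [find_cons, find_cons sub c w', ih]
      simp only [hp, hp2, if_false]
      rcases find_cases w' sub with h | h <;> rcases find_cases v sub with h2 | h2 <;>
        simp [h, h2] <;> split_ifs <;> push_cast <;> omega

lemma find_nl_of_free {w : List Char} (h : '\n' ∉ w) : PySem.Chars.find w ['\n'] = -1 := by
  rw [PySem.Chars.find_eq_neg_one_iff]
  intro hin
  exact h (hin.subset (by simp))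

lemma find_nl_append {w : List Char} (h : '\n' ∉ w) (v : List Char) :
    PySem.Chars.find (w ++ '\n' :: v) ['\n'] = (w.length : Int) := by
  induction w with
  | nil => simp [find_cons]
  | cons c w' ih =>
    have hc : ¬ (c = '\n') := fun hc => h (by simp [hc])
    have hfree : '\n' ∉ w' := fun hm => h (by simp [hm])
    rw [show (c :: w') ++ '\n' :: v = c :: (w' ++ '\n' :: v) by simp]
    rw [find_cons]
    have : ¬ (['\n'].isPrefixOf (c :: (w' ++ '\n' :: v)) = true) := by
      simp [List.isPrefixOf]
      exact fun hx => hc hx.symm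
    simp only [this, if_false, ih hfree]
    have : ((w'.length : Int)) ≠ -1 := by omega
    simp [this]

lemma find_Jt_append (sub : List Char) (hne : sub ≠ []) (hnl : '\n' ∉ sub)
    (B : List (List Char)) (hB : ∀ b ∈ B, ¬ sub <:+: b) (v : List Char) :
    PySem.Chars.find (Jt B ++ v) sub =
      if PySem.Chars.find v sub = -1 then -1
      else ((Jt B).length : Int) + PySem.Chars.find v sub := by
  induction B with
  | nil =>
    simp only [Jt, List.map_nil, List.flatten_nil, List.nil_append, List.length_nil]
    rcases find_cases v sub with h | h <;> simp [h]
  | cons b B' ih =>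
    have hb : PySem.Chars.find b sub = -1 := (PySem.Chars.find_eq_neg_one_iff b sub).2 (hB b (by simp))
    have hrest : ∀ x ∈ B', ¬ sub <:+: x := fun x hx => hB x (by simp [hx])
    have hJ : Jt (b :: B') ++ v = b ++ '\n' :: (Jt B' ++ v) := by simp [Jt]
    rw [hJ, find_append_newline sub hne hnl, hb, if_pos rfl, ih hrest]
    have hlen : (Jt (b :: B')).length = b.length + 1 + (Jt B').length := by simp [Jt]; omega
    rcases find_cases v sub with h2 | h2 <;>
      simp [h2, hlen] <;> split_ifs <;> push_cast <;> omega

lemma splitOn_go_csplit (l : List Char) : ∀ (fuel : Nat), l.length < fuel → ∀ (cur : List Char) (acc : List (List Char)),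
    PySem.Chars.splitOn.go ['\n'] fuel l cur acc =
      acc.reverse ++ ((cur.reverse ++ (csplit l).1) :: (csplit l).2) := by
  induction l with
  | nil =>
    intro fuel hf cur acc
    match fuel, hf with
    | f + 1, _ =>
      rw [PySem.Chars.splitOn.go] <;> simp [csplit]
  | cons c t ih =>
    intro fuel hf cur acc
    match fuel, hf with
    | f + 1, hf =>
      rw [PySem.Chars.splitOn.go]
      by_cases hc : c = '\n'
      · subst hc
        simp only [List.isPrefixOf, BEq.rfl, Bool.true_and, List.isPrefixOf_nil_left, if_true]
        rw [show List.drop (['\n'].length) ('\n' :: t) = t by simp]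
        rw [ih f (by simpa using hf) [] (cur.reverse :: acc)]
        simp [csplit]
      · have : ¬ (['\n'].isPrefixOf (c :: t) = true) := by
          simp [List.isPrefixOf]
          exact fun h => hc h.symm
        simp only [this, if_false]
        rw [ih f (by simpa using hf) (c :: cur) acc]
        simp [csplit, hc]

lemma splitOn_eq_csplit (t : List Char) :
    PySem.Chars.splitOn t ['\n'] = (csplit t).1 :: (csplit t).2 := by
  show PySem.Chars.splitOn.go ['\n'] (t.length + 1) t [] [] = _
  rw [splitOn_go_csplit t (t.length + 1) (by omega) [] []]
  simp

lemma csplit_LJ (t : List Char) : LJ ((csplit t).1 :: (csplit t).2) = t := by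
  induction t with
  | nil => simp [csplit, LJ]
  | cons a t ih =>
    by_cases ha : a = '\n'
    · subst ha
      simp only [csplit, reduceIte]
      rw [LJ]
      simpa using ih
    · simp only [csplit, if_neg ha]
      rcases h2 : (csplit t).2 with _ | ⟨x, xs⟩
      · rw [h2] at ih
        rw [LJ] at ih
        simp only [h2, LJ]
        simp [ih]
      · rw [h2] at ih
        rw [LJ] at ih
        simp only [h2, LJ]
        simp [ih]

lemma csplit_free (t : List Char) :
    '\n' ∉ (csplit t).1 ∧ ∀ x ∈ (csplit t).2, '\n' ∉ x := by
  induction t with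
  | nil => simp [csplit]
  | cons a t ih =>
    by_cases ha : a = '\n'
    · subst ha
      simp only [csplit, reduceIte]
      refine ⟨by simp, ?_⟩
      intro x hx
      simp at hx
      rcases hx with h | h
      · subst h; exact ih.1
      · exact ih.2 x h
    · simp only [csplit, if_neg ha]
      refine ⟨?_, ih.2⟩
      intro hx
      rcases List.mem_cons.1 hx with h | h
      · exact ha h.symm
      · exact ih.1 h

lemma find_len_bound {t sub : List Char} (h : 0 ≤ PySem.Chars.find t sub) :
    (PySem.Chars.find t sub).toNat + sub.length ≤ t.length := by
  have hs := (PySem.Chars.find_spec (s := t) (sub := sub) h).1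
  have := hs.length_le
  simp at this
  have hle := PySem.Chars.find_le_length t sub
  omega

lemma getA_eq_spec (t : List Char) : get_email_data (String.ofList t) = getASpec t := by
  rw [get_email_data, getASpec]
  simp only [PySem.Str.find, PySem.Str.findFrom, PySem.Str.slice, String.toList_ofList]
  simp only [show "From: ".toList = ['F','r','o','m',':',' '] from rfl,
             show "Subj: ".toList = ['S','u','b','j',':',' '] from rfl,
             show "\n".toList = ['\n'] from rfl]
  rcases find_cases t ['F','r','o','m',':',' '] with hq | hq
  · simp [hq, subjSpec]
  · rw [if_neg (show ¬ PySem.Chars.find t ['F','r','o','m',':',' '] < 0 by omega),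
        if_neg (show ¬ PySem.Chars.find t ['F','r','o','m',':',' '] < 0 by omega)]
    set q := PySem.Chars.find t ['F','r','o','m',':',' '] with hqdef
    have hb1 : q.toNat + 6 ≤ t.length := by
      have := find_len_bound (t := t) (sub := ['F','r','o','m',':',' ']) hq
      simpa using this
    have hcast1 : q + 6 = ((q.toNat + 6 : Nat) : Int) := by omega
    rw [hcast1, PySem.Chars.findFrom_natCast t _ _ hb1]
    rcases find_cases (t.drop (q.toNat + 6)) ['\n'] with hm | hm
    · rw [hm]
      simp
    · set m := PySem.Chars.find (t.drop (q.toNat + 6)) ['\n'] with hmdef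
      rw [if_neg (show ¬ m = -1 by omega)]
      rw [if_neg (show ¬ (((q.toNat + 6 : Nat) : Int) + m < 0) by omega),
          if_neg (show ¬ m < 0 by omega)]
      have hb2 : q.toNat + 6 + m.toNat ≤ t.length := by
        have := find_len_bound (t := t.drop (q.toNat + 6)) (sub := ['\n']) hm
        simp at this
        omega
      have hcast2 : ((q.toNat + 6 : Nat) : Int) + m = ((q.toNat + 6 + m.toNat : Nat) : Int) := by omega
      rw [hcast2, PySem.Chars.findFrom_natCast t _ _ hb2]
      rw [subjSpec]
      rcases find_cases (t.drop (q.toNat + 6 + m.toNat)) ['S','u','b','j',':',' '] with hr | hr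
      · rw [hr]
        simp
      · set r := PySem.Chars.find (t.drop (q.toNat + 6 + m.toNat)) ['S','u','b','j',':',' '] with hrdef
        rw [if_neg (show ¬ r = -1 by omega)]
        rw [if_neg (show ¬ (((q.toNat + 6 + m.toNat : Nat) : Int) + r < 0) by omega),
            if_neg (show ¬ r < 0 by omega)]
        have hb3 : q.toNat + 6 + m.toNat + r.toNat + 6 ≤ t.length := by
          have := find_len_bound (t := t.drop (q.toNat + 6 + m.toNat)) (sub := ['S','u','b','j',':',' ']) hr
          simp at this
          omega
        have hcast3 : ((q.toNat + 6 + m.toNat : Nat) : Int) + r + 6 = ((q.toNat + 6 + m.toNat + r.toNat + 6 : Nat) : Int) := by omega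
        rw [hcast3, PySem.Chars.findFrom_natCast t _ _ hb3]
        have hdd : (t.drop (q.toNat + 6 + m.toNat)).drop (r.toNat + 6) = t.drop (q.toNat + 6 + m.toNat + r.toNat + 6) := by
          rw [List.drop_drop]; ring_nf
        rw [hdd]
        rcases find_cases (t.drop (q.toNat + 6 + m.toNat + r.toNat + 6)) ['\n'] with hm2 | hm2
        · rw [hm2]
          simp
        · set m2 := PySem.Chars.find (t.drop (q.toNat + 6 + m.toNat + r.toNat + 6)) ['\n'] with hm2def
          rw [if_neg (show ¬ m2 = -1 by omega)]
          rw [if_neg (show ¬ (((q.toNat + 6 + m.toNat + r.toNat + 6 : Nat) : Int) + m2 < 0) by omega),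
              if_neg (show ¬ m2 < 0 by omega)]
          congr 2
          · simp only [PySem.Chars.slice_eq_listSlice, PySem.List.slice_natCast]
            rw [show q.toNat + 6 + m.toNat - (q.toNat + 6) = m.toNat from by omega]
          · congr 1
            rw [show ((q.toNat + 6 + m.toNat + r.toNat + 6 : Nat) : Int) + m2
                  = ((q.toNat + 6 + m.toNat + r.toNat + 6 + m2.toNat : Nat) : Int) by omega]
            simp only [PySem.Chars.slice_eq_listSlice, PySem.List.slice_natCast]
            rw [show q.toNat + 6 + m.toNat + r.toNat + 6 + m2.toNat - (q.toNat + 6 + m.toNat + r.toNat + 6) = m2.toNat from by omega]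

lemma drop_newline (b T : List Char) (k : Nat) :
    List.drop (b.length + 1 + k) (b ++ '\n' :: T) = List.drop k T := by
  rw [show b.length + 1 + k = b.length + (1 + k) from by omega]
  rw [List.drop_append]
  rw [List.drop_eq_nil_of_le (by omega), List.nil_append,
      show b.length + (1 + k) - b.length = k + 1 from by omega, List.drop_succ_cons]

lemma subjSpec_cons_nl (T : List Char) : subjSpec ('\n' :: T) = subjSpec T := by
  rw [subjSpec, subjSpec]
  have hp : ¬ (['S','u','b','j',':',' '].isPrefixOf ('\n' :: T) = true) := by
    simp [List.isPrefixOf]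
  rw [find_cons]
  simp only [hp, Bool.false_eq_true, if_false]
  rcases find_cases T ['S','u','b','j',':',' '] with h | h
  · simp [h]
  · rw [if_neg (show ¬ PySem.Chars.find T ['S','u','b','j',':',' '] = -1 from by omega)]
    rw [if_neg (show ¬ PySem.Chars.find T ['S','u','b','j',':',' '] + 1 < 0 from by omega),
        if_neg (show ¬ PySem.Chars.find T ['S','u','b','j',':',' '] < 0 from by omega)]
    rw [show (PySem.Chars.find T ['S','u','b','j',':',' '] + 1).toNat + 6
          = ((PySem.Chars.find T ['S','u','b','j',':',' ']).toNat + 6) + 1 from by omega]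
    rw [List.drop_succ_cons]

lemma subjSpec_shift {b : List Char}
    (h : PySem.Chars.find b ['S','u','b','j',':',' '] = -1) (T : List Char) :
    subjSpec (b ++ '\n' :: T) = subjSpec T := by
  rw [subjSpec, subjSpec]
  rw [find_append_newline _ (by simp) (by decide) b T, h, if_pos rfl]
  rcases find_cases T ['S','u','b','j',':',' '] with h2 | h2
  · simp [h2]
  · rw [if_neg (show ¬ PySem.Chars.find T ['S','u','b','j',':',' '] = -1 from by omega)]
    rw [if_neg (show ¬ ((b.length : Int) + 1 + PySem.Chars.find T ['S','u','b','j',':',' '] < 0) from by omega),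
        if_neg (show ¬ PySem.Chars.find T ['S','u','b','j',':',' '] < 0 from by omega)]
    rw [show ((b.length : Int) + 1 + PySem.Chars.find T ['S','u','b','j',':',' ']).toNat + 6
          = b.length + 1 + ((PySem.Chars.find T ['S','u','b','j',':',' ']).toNat + 6) from by omega]
    rw [drop_newline]

lemma getASpec_shift {b : List Char}
    (h : PySem.Chars.find b ['F','r','o','m',':',' '] = -1) (T : List Char) :
    getASpec (b ++ '\n' :: T) = getASpec T := by
  rw [getASpec, getASpec]
  rw [find_append_newline _ (by simp) (by decide) b T, h, if_pos rfl]
  rcases find_cases T ['F','r','o','m',':',' '] with h2 | h2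
  · simp [h2]
  · rw [if_neg (show ¬ PySem.Chars.find T ['F','r','o','m',':',' '] = -1 from by omega)]
    rw [if_neg (show ¬ ((b.length : Int) + 1 + PySem.Chars.find T ['F','r','o','m',':',' '] < 0) from by omega),
        if_neg (show ¬ PySem.Chars.find T ['F','r','o','m',':',' '] < 0 from by omega)]
    rw [show ((b.length : Int) + 1 + PySem.Chars.find T ['F','r','o','m',':',' ']).toNat + 6
          = b.length + 1 + ((PySem.Chars.find T ['F','r','o','m',':',' ']).toNat + 6) from by omega]
    rw [drop_newline]
    rw [show b.length + 1 + ((PySem.Chars.find T ['F','r','o','m',':',' ']).toNat + 6) +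
          (PySem.Chars.find (List.drop ((PySem.Chars.find T ['F','r','o','m',':',' ']).toNat + 6) T) ['\n']).toNat
          = b.length + 1 + ((PySem.Chars.find T ['F','r','o','m',':',' ']).toNat + 6 +
          (PySem.Chars.find (List.drop ((PySem.Chars.find T ['F','r','o','m',':',' ']).toNat + 6) T) ['\n']).toNat) from by omega]
    rw [drop_newline]

lemma subj_walk (frm : String) (L : List (List Char)) (hL : ∀ b ∈ L, '\n' ∉ b)
    (p : List Char) (hp : '\n' ∉ p) :
    (subjSpec (Jt L ++ p)).map (fun sbj => [("from", frm), ("subject", String.ofList sbj)]) =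
      alt_find_subj frm (L.map String.ofList) := by
  induction L with
  | nil =>
    simp only [Jt, List.map_nil, List.flatten_nil, List.nil_append]
    rw [alt_find_subj]
    rcases find_cases p ['S','u','b','j',':',' '] with h | h
    · rw [subjSpec, if_pos (show PySem.Chars.find p ['S','u','b','j',':',' '] < 0 from by omega)]
      rfl
    · have hm : PySem.Chars.find (List.drop ((PySem.Chars.find p ['S','u','b','j',':',' ']).toNat + 6) p) ['\n'] = -1 :=
        find_nl_of_free (fun hmm => hp (List.mem_of_mem_drop hmm))
      rw [subjSpec, if_neg (show ¬ PySem.Chars.find p ['S','u','b','j',':',' '] < 0 from by omega),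
          if_pos (show PySem.Chars.find (List.drop ((PySem.Chars.find p ['S','u','b','j',':',' ']).toNat + 6) p) ['\n'] < 0 from by omega)]
      rfl
  | cons b L' ih =>
    have hJ : Jt (b :: L') ++ p = b ++ '\n' :: (Jt L' ++ p) := by simp [Jt]
    have hbfree : '\n' ∉ b := hL b (by simp)
    have hL' : ∀ x ∈ L', '\n' ∉ x := fun x hx => hL x (by simp [hx])
    rw [hJ, show (b :: L').map String.ofList = String.ofList b :: L'.map String.ofList from by simp]
    rw [alt_find_subj]
    simp only [PySem.Str.find, String.toList_ofList,
               show "Subj: ".toList = ['S','u','b','j',':',' '] from rfl]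
    rcases find_cases b ['S','u','b','j',':',' '] with h | h
    · rw [subjSpec_shift h, if_pos (by omega)]
      exact ih hL'
    · rw [if_neg (by omega)]
      set q := PySem.Chars.find b ['S','u','b','j',':',' '] with hqdef
      have hb6 : q.toNat + 6 ≤ b.length := by
        have := find_len_bound (t := b) (sub := ['S','u','b','j',':',' ']) h
        simpa using this
      rw [subjSpec]
      rw [find_append_newline _ (by simp) (by decide) b (Jt L' ++ p),
          if_neg (show ¬ q = -1 from by omega)]
      rw [if_neg (show ¬ q < 0 from by omega)]
      rw [List.drop_append_of_le_length hb6]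
      have hfree : '\n' ∉ List.drop (q.toNat + 6) b := fun hm => hbfree (List.mem_of_mem_drop hm)
      rw [find_nl_append hfree]
      rw [if_neg (show ¬ ((List.drop (q.toNat + 6) b).length : Int) < 0 from by omega)]
      rw [show ((List.drop (q.toNat + 6) b).length : Int).toNat = (List.drop (q.toNat + 6) b).length from by omega]
      rw [List.take_left]
      rw [Option.map_some]
      congr 3
      rw [PySem.Str.slice, String.toList_ofList, PySem.Chars.slice_eq_listSlice,
          PySem.List.slice_from _ (show (0:Int) ≤ q + 6 from by omega)]
      rw [show (q + 6).toNat = q.toNat + 6 from by omega]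

lemma parse_walk (L : List (List Char)) (hL : ∀ b ∈ L, '\n' ∉ b)
    (p : List Char) (hp : '\n' ∉ p) :
    getASpec (Jt L ++ p) = alt_parse_lines (L.map String.ofList) := by
  induction L with
  | nil =>
    simp only [Jt, List.map_nil, List.flatten_nil, List.nil_append]
    rw [alt_parse_lines]
    rcases find_cases p ['F','r','o','m',':',' '] with h | h
    · rw [getASpec, if_pos (show PySem.Chars.find p ['F','r','o','m',':',' '] < 0 from by omega)]
    · have hm : PySem.Chars.find (List.drop ((PySem.Chars.find p ['F','r','o','m',':',' ']).toNat + 6) p) ['\n'] = -1 :=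
        find_nl_of_free (fun hmm => hp (List.mem_of_mem_drop hmm))
      rw [getASpec, if_neg (show ¬ PySem.Chars.find p ['F','r','o','m',':',' '] < 0 from by omega),
          if_pos (show PySem.Chars.find (List.drop ((PySem.Chars.find p ['F','r','o','m',':',' ']).toNat + 6) p) ['\n'] < 0 from by omega)]
  | cons b L' ih =>
    have hJ : Jt (b :: L') ++ p = b ++ '\n' :: (Jt L' ++ p) := by simp [Jt]
    have hbfree : '\n' ∉ b := hL b (by simp)
    have hL' : ∀ x ∈ L', '\n' ∉ x := fun x hx => hL x (by simp [hx])
    rw [hJ, show (b :: L').map String.ofList = String.ofList b :: L'.map String.ofList from by simp]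
    rw [alt_parse_lines]
    simp only [PySem.Str.find, String.toList_ofList,
               show "From: ".toList = ['F','r','o','m',':',' '] from rfl]
    rcases find_cases b ['F','r','o','m',':',' '] with h | h
    · rw [getASpec_shift h, if_pos (by omega)]
      exact ih hL'
    · rw [if_neg (by omega)]
      set q := PySem.Chars.find b ['F','r','o','m',':',' '] with hqdef
      have hb6 : q.toNat + 6 ≤ b.length := by
        have := find_len_bound (t := b) (sub := ['F','r','o','m',':',' ']) h
        simpa using this
      rw [getASpec]
      rw [find_append_newline _ (by simp) (by decide) b (Jt L' ++ p),
          if_neg (show ¬ q = -1 from by omega)]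
      rw [if_neg (show ¬ q < 0 from by omega)]
      rw [List.drop_append_of_le_length hb6]
      have hfree : '\n' ∉ List.drop (q.toNat + 6) b := fun hm => hbfree (List.mem_of_mem_drop hm)
      rw [find_nl_append hfree]
      rw [if_neg (show ¬ ((List.drop (q.toNat + 6) b).length : Int) < 0 from by omega)]
      rw [show ((List.drop (q.toNat + 6) b).length : Int).toNat = (List.drop (q.toNat + 6) b).length from by omega]
      rw [List.take_left]
      rw [show q.toNat + 6 + (List.drop (q.toNat + 6) b).length = b.length from by
            rw [List.length_drop]; omega]
      rw [List.drop_left (l₁ := b)]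
      rw [subjSpec_cons_nl]
      have hfrm : PySem.Str.slice (String.ofList b) (some (q + 6)) none
          = String.ofList (List.drop (q.toNat + 6) b) := by
        rw [PySem.Str.slice, String.toList_ofList, PySem.Chars.slice_eq_listSlice,
            PySem.List.slice_from _ (show (0:Int) ≤ q + 6 from by omega)]
        rw [show (q + 6).toNat = q.toNat + 6 from by omega]
      rw [hfrm]
      rw [← subj_walk (String.ofList (List.drop (q.toNat + 6) b)) L' hL' p hp]
      cases subjSpec (Jt L' ++ p) <;> rfl

-- ---- main loop vs line walk ----
lemma take_app {α : Type} (l₁ l₂ : List α) (n : Nat) :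
    List.take (l₁.length + n) (l₁ ++ l₂) = l₁ ++ List.take n l₂ := by
  rw [List.take_append]
  simp

lemma drop_app {α : Type} (l₁ l₂ : List α) (n : Nat) :
    List.drop (l₁.length + n) (l₁ ++ l₂) = List.drop n l₂ := by
  rw [List.drop_append]
  rw [List.drop_eq_nil_of_le (by omega), List.nil_append]
  congr 1
  omega

lemma isIn_sep_of_find (l : List Char) :
    PySem.Str.isIn "-----" (String.ofList l) = true ↔ 0 ≤ PySem.Chars.find l ['-','-','-','-','-'] := by
  rw [PySem.Str.isIn_iff_infix, String.toList_ofList, String.toList_ofList]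
  exact (PySem.Chars.find_nonneg_iff l _).symm

lemma walk_spec (L : List (List Char)) (hL : ∀ b ∈ L, '\n' ∉ b) :
    ∀ (B : List (List Char)), (∀ b ∈ B, '\n' ∉ b) → (∀ b ∈ B, ¬ (['-','-','-','-','-'] : List Char) <:+: b) →
    specA (Jt B ++ LJ L) = alt_walk (L.map String.ofList) (B.map String.ofList) := by
  induction L with
  | nil =>
    intro B hBnl hBsep
    have h1 : PySem.Chars.find (Jt B) ['-','-','-','-','-'] = -1 := by
      have h2 := find_Jt_append ['-','-','-','-','-'] (by simp) (by decide) B hBsep []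
      rw [find_nil' _ (by simp), if_pos rfl] at h2
      simpa using h2
    rw [LJ, List.append_nil, specA, if_pos (by omega)]
    simp [alt_walk]
  | cons l rest ih =>
    intro B hBnl hBsep
    have hlfree : '\n' ∉ l := hL l (by simp)
    have hrest : ∀ x ∈ rest, '\n' ∉ x := fun x hx => hL x (by simp [hx])
    rw [show (l :: rest).map String.ofList = String.ofList l :: rest.map String.ofList from by simp]
    rw [alt_walk]
    rcases find_cases l ['-','-','-','-','-'] with hcut | hcut
    · have hni : ¬ PySem.Str.isIn "-----" (String.ofList l) = true := by
        rw [isIn_sep_of_find]; omega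
      rw [if_neg hni]
      cases rest with
      | nil =>
        have h1 : PySem.Chars.find (Jt B ++ l) ['-','-','-','-','-'] = -1 := by
          have h2 := find_Jt_append ['-','-','-','-','-'] (by simp) (by decide) B hBsep l
          rw [hcut, if_pos rfl] at h2
          exact h2
        rw [LJ, specA, if_pos (by omega)]
        simp [alt_walk]
      | cons r rs =>
        rw [LJ]
        rw [show Jt B ++ (l ++ '\n' :: LJ (r :: rs)) = Jt (B ++ [l]) ++ LJ (r :: rs) from by simp [Jt]]
        rw [ih hrest (B ++ [l])
              (fun x hx => by rcases List.mem_append.1 hx with h | h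
                              · exact hBnl x h
                              · simp at h; subst h; exact hlfree)
              (fun x hx => by rcases List.mem_append.1 hx with h | h
                              · exact hBsep x h
                              · simp at h; subst h
                                rw [← PySem.Chars.find_eq_neg_one_iff]
                                exact hcut)]
        simp
    · have hyi : PySem.Str.isIn "-----" (String.ofList l) = true := by
        rw [isIn_sep_of_find]; omega
      rw [if_pos hyi]
      set cut := PySem.Chars.find l ['-','-','-','-','-'] with hcutdef
      have hcut5 : cut.toNat + 5 ≤ l.length := by
        have := find_len_bound (t := l) (sub := ['-','-','-','-','-']) hcut
        simpa using this
      have hpfree : '\n' ∉ List.take cut.toNat l := fun hm => hlfree (List.mem_of_mem_take hm)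
      cases rest with
      | nil =>
        rw [LJ, specA]
        have hfind : PySem.Chars.find (Jt B ++ l) ['-','-','-','-','-'] = ((Jt B).length : Int) + cut := by
          have h2 := find_Jt_append ['-','-','-','-','-'] (by simp) (by decide) B hBsep l
          rw [← hcutdef, if_neg (show ¬ cut = -1 from by omega)] at h2
          exact h2
        rw [hfind, if_neg (show ¬ ((Jt B).length : Int) + cut < 0 from by omega)]
        rw [show (((Jt B).length : Int) + cut).toNat = (Jt B).length + cut.toNat from by omega]
        rw [take_app, drop_app]
        rw [parse_walk B hBnl (List.take cut.toNat l) hpfree]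
        have hm : PySem.Chars.find (List.drop cut.toNat l) ['\n'] = -1 :=
          find_nl_of_free (fun hmm => hlfree (List.mem_of_mem_drop hmm))
        rw [if_pos (by omega)]
        rw [show List.map String.ofList B = B.map String.ofList from rfl]
        cases alt_parse_lines (B.map String.ofList) <;> simp [alt_walk]
      | cons r rs =>
        rw [LJ]
        have hv : PySem.Chars.find (l ++ '\n' :: LJ (r :: rs)) ['-','-','-','-','-'] = cut := by
          rw [find_append_newline _ (by simp) (by decide), ← hcutdef,
              if_neg (show ¬ cut = -1 from by omega)]
        rw [specA]
        have hfind : PySem.Chars.find (Jt B ++ (l ++ '\n' :: LJ (r :: rs))) ['-','-','-','-','-']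
            = ((Jt B).length : Int) + cut := by
          have h2 := find_Jt_append ['-','-','-','-','-'] (by simp) (by decide) B hBsep (l ++ '\n' :: LJ (r :: rs))
          rw [hv, if_neg (show ¬ cut = -1 from by omega)] at h2
          exact h2
        rw [hfind, if_neg (show ¬ ((Jt B).length : Int) + cut < 0 from by omega)]
        rw [show (((Jt B).length : Int) + cut).toNat = (Jt B).length + cut.toNat from by omega]
        rw [take_app, drop_app]
        rw [List.take_append_of_le_length (by omega)]
        rw [parse_walk B hBnl (List.take cut.toNat l) hpfree]
        rw [List.drop_append_of_le_length (by omega)]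
        have hfree : '\n' ∉ List.drop cut.toNat l := fun hm => hlfree (List.mem_of_mem_drop hm)
        rw [find_nl_append hfree]
        rw [if_neg (show ¬ ((List.drop cut.toNat l).length : Int) < 0 from by omega)]
        rw [show (Jt B).length + cut.toNat + ((List.drop cut.toNat l).length : Int).toNat + 1
              = (Jt B ++ l).length + 1 + 0 from by simp [List.length_drop]; omega]
        rw [show Jt B ++ (l ++ '\n' :: LJ (r :: rs)) = (Jt B ++ l) ++ '\n' :: LJ (r :: rs) from by simp]
        rw [drop_newline, List.drop_zero]
        have hX := ih hrest [] (by simp) (by simp)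
        rw [show Jt [] ++ LJ (r :: rs) = LJ (r :: rs) from by simp [Jt]] at hX
        rw [hX]
        rw [show List.map String.ofList B = B.map String.ofList from rfl]
        cases alt_parse_lines (B.map String.ofList) <;> simp [alt_walk]

lemma loop_spec (s : String) : ∀ (fuel : Nat) (k : Nat) (acc : List (List (String × String))),
    k ≤ s.toList.length → s.toList.length - k < fuel →
    extract_loop s fuel (k : Int) acc = acc ++ specA (s.toList.drop k) := by
  intro fuel
  induction fuel with
  | zero => intro k acc hk hf; omega
  | succ fuel ih =>
    intro k acc hk hf
    rw [extract_loop]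
    simp only [PySem.Str.findFrom, PySem.Str.slice, PySem.Str.find,
               show "-----".toList = ['-','-','-','-','-'] from rfl,
               show "\n".toList = ['\n'] from rfl]
    rw [PySem.Chars.findFrom_natCast s.toList ['-','-','-','-','-'] k hk]
    rcases find_cases (s.toList.drop k) ['-','-','-','-','-'] with hn | hn
    · rw [hn, if_pos rfl, if_pos (show (-1 : Int) < 0 from by decide)]
      rw [specA, if_pos (by omega)]
      simp
    · rw [if_neg (show ¬ PySem.Chars.find (s.toList.drop k) ['-','-','-','-','-'] = -1 from by omega)]
      rw [if_neg (show ¬ ((k : Int) + PySem.Chars.find (s.toList.drop k) ['-','-','-','-','-'] < 0) from by omega)]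
      set n := PySem.Chars.find (s.toList.drop k) ['-','-','-','-','-'] with hndef
      have hslice : PySem.Chars.slice s.toList (some (k : Int)) (some ((k : Int) + n))
          = List.take n.toNat (s.toList.drop k) := by
        rw [PySem.Chars.slice_eq_listSlice,
            show ((k : Int) + n) = ((k + n.toNat : Nat) : Int) from by omega,
            PySem.List.slice_natCast]
        congr 1
        omega
      rw [hslice, getA_eq_spec]
      have hb2 : k + n.toNat ≤ s.toList.length := by
        have := find_len_bound (t := s.toList.drop k) (sub := ['-','-','-','-','-']) hn
        simp only [List.length_drop, List.length_cons, List.length_nil] at this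
        omega
      rw [show (k : Int) + n = ((k + n.toNat : Nat) : Int) from by omega,
          PySem.Chars.findFrom_natCast s.toList ['\n'] (k + n.toNat) hb2]
      have hdd : s.toList.drop (k + n.toNat) = (s.toList.drop k).drop n.toNat := by
        rw [List.drop_drop]
      rw [hdd]
      rw [specA]
      rw [if_neg (show ¬ n < 0 from by omega), ← hndef]
      rcases find_cases ((s.toList.drop k).drop n.toNat) ['\n'] with hm | hm
      · rw [hm, if_pos rfl, if_pos (show (-1 : Int) < 0 from by decide),
            if_pos (show (-1 : Int) < 0 from by decide)]
        cases getASpec (List.take n.toNat (s.toList.drop k)) <;> simp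
      · rw [if_neg (show ¬ PySem.Chars.find ((s.toList.drop k).drop n.toNat) ['\n'] = -1 from by omega)]
        rw [if_neg (show ¬ (((k + n.toNat : Nat) : Int) + PySem.Chars.find ((s.toList.drop k).drop n.toNat) ['\n'] < 0) from by omega)]
        rw [if_neg (show ¬ PySem.Chars.find ((s.toList.drop k).drop n.toNat) ['\n'] < 0 from by omega)]
        set m := PySem.Chars.find ((s.toList.drop k).drop n.toNat) ['\n'] with hmdef
        have hk' : k + n.toNat + m.toNat + 1 ≤ s.toList.length := by
          have := find_len_bound (t := (s.toList.drop k).drop n.toNat) (sub := ['\n']) hm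
          simp only [List.length_drop, List.length_cons, List.length_nil] at this
          omega
        rw [show ((k + n.toNat : Nat) : Int) + m + 1 = ((k + n.toNat + m.toNat + 1 : Nat) : Int) from by omega]
        rw [ih (k + n.toNat + m.toNat + 1) _ hk' (by omega)]
        have hdd2 : s.toList.drop (k + n.toNat + m.toNat + 1) = (s.toList.drop k).drop (n.toNat + m.toNat + 1) := by
          rw [List.drop_drop]
          congr 1
          omega
        rw [hdd2]
        cases getASpec (List.take n.toNat (s.toList.drop k)) <;> simp

-- ===== VERDICT (by name: the statement is the Claim_ definition above) =====
set_option maxHeartbeats 1000000 in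
theorem extract_email_details_spec : Claim_equal_extract_email_details := by
  intro data_str _hdom
  show extract_email_details data_str = extract_email_details_alt data_str
  simp only [extract_email_details, extract_email_details_alt]
  by_cases he : PySem.Str.find data_str "Emails from" < 0
  · rw [if_pos he, if_pos he]
  · rw [if_neg he, if_neg he]
    by_cases hnl : PySem.Str.findFrom data_str "\n" (PySem.Str.find data_str "Emails from") < 0
    · rw [if_pos hnl, if_pos hnl]
    · rw [if_neg hnl, if_neg hnl]
      congr 1
      set e := PySem.Str.find data_str "Emails from" with hedef
      have he0 : 0 ≤ e := by omega
      have hele : e ≤ (data_str.toList.length : Int) := by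
        rw [hedef, PySem.Str.find]
        exact PySem.Chars.find_le_length _ _
      have heN : e = ((e.toNat : Nat) : Int) := by omega
      have hkb : e.toNat ≤ data_str.toList.length := by omega
      have hFF : PySem.Str.findFrom data_str "\n" e
          = (if PySem.Chars.find (data_str.toList.drop e.toNat) ['\n'] = -1 then (-1 : Int)
             else ((e.toNat : Nat) : Int) + PySem.Chars.find (data_str.toList.drop e.toNat) ['\n']) := by
        rw [PySem.Str.findFrom, show "\n".toList = ['\n'] from rfl, heN,
            PySem.Chars.findFrom_natCast _ _ _ hkb]
        simp only [Int.toNat_natCast]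
      have key : ∃ K : Nat, PySem.Str.findFrom data_str "\n" e = (K : Int) ∧ K + 1 ≤ data_str.toList.length := by
        rcases find_cases (data_str.toList.drop e.toNat) ['\n'] with h | h
        · exfalso
          apply hnl
          rw [hFF, if_pos h]
          decide
        · have hlen := find_len_bound (t := data_str.toList.drop e.toNat) (sub := ['\n']) h
          simp only [List.length_drop, List.length_cons, List.length_nil] at hlen
          refine ⟨e.toNat + (PySem.Chars.find (data_str.toList.drop e.toNat) ['\n']).toNat, ?_, by omega⟩
          rw [hFF, if_neg (by omega)]
          push_cast
          omega
      obtain ⟨K, hK, hKlen⟩ := key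
      rw [hK]
      rw [show (K : Int) + 1 = ((K + 1 : Nat) : Int) from by push_cast; ring]
      rw [loop_spec data_str (data_str.toList.length + 1) (K + 1) [] (by omega) (by omega)]
      have hu : PySem.Str.slice data_str (some ((K + 1 : Nat) : Int)) none
          = String.ofList (data_str.toList.drop (K + 1)) := by
        rw [PySem.Str.slice, PySem.Chars.slice_eq_listSlice,
            PySem.List.slice_from _ (show (0 : Int) ≤ ((K + 1 : Nat) : Int) from by omega)]
        simp
      rw [hu]
      have hsplit : (PySem.Str.split? (String.ofList (data_str.toList.drop (K + 1))) "\n").getD []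
          = ((csplit (data_str.toList.drop (K + 1))).1 :: (csplit (data_str.toList.drop (K + 1))).2).map String.ofList := by
        rw [PySem.Str.split?, PySem.Chars.split?]
        simp [splitOn_eq_csplit]
      rw [hsplit]
      have hLfree : ∀ b ∈ (csplit (data_str.toList.drop (K + 1))).1 :: (csplit (data_str.toList.drop (K + 1))).2, '\n' ∉ b := by
        intro b hb
        rcases List.mem_cons.1 hb with h | h
        · subst h; exact (csplit_free _).1
        · exact (csplit_free _).2 b h
      have hw := walk_spec _ hLfree [] (by simp) (by simp)
      rw [show Jt ([] : List (List Char)) = [] from by simp [Jt], List.nil_append, csplit_LJ] at hw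
      rw [List.map_nil] at hw
      simpa using hw
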